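-- pv_equiv track=rewrite | github.com/PetitJump/Ecologic | app.py | verifier_succes
-- ===== SOURCE A (Python) =====
-- SUCCES_DEF = [
--     {"id": "premier_pas",  "emoji": "🌱", "nom": "Premier pas",       "desc": "Lancer la simulation pour la première fois."},
--     {"id": "equilibre",    "emoji": "⚖️",  "nom": "Équilibre fragile", "desc": "Maintenir les 3 espèces en vie pendant 10 ans."},
--     {"id": "meute_royale", "emoji": "🐺", "nom": "Meute royale",      "desc": "Atteindre exactement 100 loups."},
--     {"id": "troupeau",     "emoji": "🦌", "nom": "Troupeau parfait",  "desc": "Atteindre exactement 50 cerfs."},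
--     {"id": "foret_dense",  "emoji": "🌿", "nom": "Forêt dense",       "desc": "Atteindre exactement 200 touffes d'herbe."},
--     {"id": "survie_seche", "emoji": "☀️",  "nom": "Résistance solaire","desc": "Survivre a une secheresse sans extinction."},
--     {"id": "survie_hiver", "emoji": "❄️",  "nom": "Hiver de fer",     "desc": "Survivre a un hiver rigoureux sans extinction."},
--     {"id": "cycle",        "emoji": "🔄", "nom": "Le Cycle",          "desc": "Atteindre l'annee 20."},
--     {"id": "extinction",   "emoji": "💀", "nom": "Extinction",        "desc": "Laisser disparaitre une espece."},
-- ]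
--
-- def verifier_succes(annee, predateur, proie, vegetal, meteo_cle, succes_courants):
--     nouveaux = []
--     def debloquer(sid):
--         if not succes_courants.get(sid):
--             succes_courants[sid] = True
--             defn = next(s for s in SUCCES_DEF if s["id"] == sid)
--             nouveaux.append(defn)
--
--     if annee >= 1:   debloquer("premier_pas")
--     if annee >= 20:  debloquer("cycle")
--     if predateur == 100: debloquer("meute_royale")
--     if proie == 50:      debloquer("troupeau")
--     if vegetal == 200:   debloquer("foret_dense")
--     if annee >= 10 and predateur > 0 and proie > 0 and vegetal > 0:
--         debloquer("equilibre")
--     if meteo_cle == "secheresse" and predateur > 0 and proie > 0 and vegetal > 0: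
--         debloquer("survie_seche")
--     if meteo_cle == "hiver" and predateur > 0 and proie > 0 and vegetal > 0:
--         debloquer("survie_hiver")
--     if predateur == 0 or proie == 0 or vegetal == 0:
--         debloquer("extinction")
--     return nouveaux
-- ===== SOURCE B (Python) =====
-- SUCCES_DEF = [
--     {"id": "premier_pas",  "emoji": "\U0001F331", "nom": "Premier pas",       "desc": "Lancer la simulation pour la premi\u00e8re fois."},
--     {"id": "equilibre",    "emoji": "\u2696\ufe0f",  "nom": "\u00c9quilibre fragile", "desc": "Maintenir les 3 esp\u00e8ces en vie pendant 10 ans."},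
--     {"id": "meute_royale", "emoji": "\U0001F43A", "nom": "Meute royale",      "desc": "Atteindre exactement 100 loups."},
--     {"id": "troupeau",     "emoji": "\U0001F98C", "nom": "Troupeau parfait",  "desc": "Atteindre exactement 50 cerfs."},
--     {"id": "foret_dense",  "emoji": "\U0001F33F", "nom": "For\u00eat dense",       "desc": "Atteindre exactement 200 touffes d'herbe."},
--     {"id": "survie_seche", "emoji": "\u2600\ufe0f",  "nom": "R\u00e9sistance solaire","desc": "Survivre a une secheresse sans extinction."},
--     {"id": "survie_hiver", "emoji": "\u2744\ufe0f",  "nom": "Hiver de fer",     "desc": "Survivre a un hiver rigoureux sans extinction."},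
--     {"id": "cycle",        "emoji": "\U0001F504", "nom": "Le Cycle",          "desc": "Atteindre l'annee 20."},
--     {"id": "extinction",   "emoji": "\U0001F480", "nom": "Extinction",        "desc": "Laisser disparaitre une espece."},
-- ]
--
-- # announcement priority: the order in which unlocks are reported
-- _RANG = {"premier_pas": 0, "cycle": 1, "meute_royale": 2, "troupeau": 3,
--          "foret_dense": 4, "equilibre": 5, "survie_seche": 6,
--          "survie_hiver": 7, "extinction": 8}
--
-- def _debloque(sid, annee, predateur, proie, vegetal, meteo_cle):
--     vivant = predateur > 0 and proie > 0 and vegetal > 0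
--     if sid == "premier_pas":  return annee >= 1
--     if sid == "cycle":        return annee >= 20
--     if sid == "meute_royale": return predateur == 100
--     if sid == "troupeau":     return proie == 50
--     if sid == "foret_dense":  return vegetal == 200
--     if sid == "equilibre":    return annee >= 10 and vivant
--     if sid == "survie_seche": return meteo_cle == "secheresse" and vivant
--     if sid == "survie_hiver": return meteo_cle == "hiver" and vivant
--     if sid == "extinction":   return predateur == 0 or proie == 0 or vegetal == 0
--     return False
--
-- def verifier_succes(annee, predateur, proie, vegetal, meteo_cle, succes_courants):
--     # pass 1: walk the definition table itself, keeping each achievement that is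
--     # newly earned by the current state; pass 2: sort by announcement priority.
--     gagnes = [s for s in SUCCES_DEF
--               if _debloque(s["id"], annee, predateur, proie, vegetal, meteo_cle)
--               and not succes_courants.get(s["id"])]
--     gagnes.sort(key=lambda s: _RANG[s["id"]])
--     for s in gagnes:
--         succes_courants[s["id"]] = True
--     return gagnes
-- ===== Notes on version B (the rewrite author's own statement) =====
-- stated objective: alternative
-- what changed: Instead of A's nine flat if/debloquer branches that build the output in check order with a per-unlock next() scan, B traverses the definition table SUCCES_DEF once, keeps each newly-earned achievement via a sid-dispatch predicate, then stable-sorts the collected definitions by an announcement-priority rank to recover the reporting order.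
import Mathlib
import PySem

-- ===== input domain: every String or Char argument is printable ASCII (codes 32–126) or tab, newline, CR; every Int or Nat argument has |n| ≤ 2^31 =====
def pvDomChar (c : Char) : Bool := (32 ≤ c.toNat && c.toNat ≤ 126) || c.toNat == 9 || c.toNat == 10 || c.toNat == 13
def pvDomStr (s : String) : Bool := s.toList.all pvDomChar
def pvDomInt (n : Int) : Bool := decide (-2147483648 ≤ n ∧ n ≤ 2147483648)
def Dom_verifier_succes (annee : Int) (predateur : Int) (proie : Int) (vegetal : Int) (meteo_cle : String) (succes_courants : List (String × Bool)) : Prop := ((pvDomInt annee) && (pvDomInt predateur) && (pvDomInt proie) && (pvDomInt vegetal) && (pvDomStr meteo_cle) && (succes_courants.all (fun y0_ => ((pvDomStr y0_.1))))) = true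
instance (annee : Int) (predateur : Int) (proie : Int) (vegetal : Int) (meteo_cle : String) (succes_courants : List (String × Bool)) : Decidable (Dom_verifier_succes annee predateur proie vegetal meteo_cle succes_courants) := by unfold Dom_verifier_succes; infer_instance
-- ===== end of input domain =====

-- B replaces A's nine flat if/debloquer branches (which build the output in check order with a
-- per-unlock next() scan) by one filtering pass over the definition table SUCCES_DEF itself followed
-- by a stable sort on an announcement-priority rank (objective: alternative). Both A and B also
-- mutate the succes_courants dict with the same entries in Python; the equivalence proved here is
-- about the return value.

-- ===== PORT A =====
def succesDef : List (List (String × String)) :=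
  [ [("id", "premier_pas"),  ("emoji", "🌱"), ("nom", "Premier pas"),       ("desc", "Lancer la simulation pour la première fois.")],
    [("id", "equilibre"),    ("emoji", "⚖️"),  ("nom", "Équilibre fragile"), ("desc", "Maintenir les 3 espèces en vie pendant 10 ans.")],
    [("id", "meute_royale"), ("emoji", "🐺"), ("nom", "Meute royale"),      ("desc", "Atteindre exactement 100 loups.")],
    [("id", "troupeau"),     ("emoji", "🦌"), ("nom", "Troupeau parfait"),  ("desc", "Atteindre exactement 50 cerfs.")],
    [("id", "foret_dense"),  ("emoji", "🌿"), ("nom", "Forêt dense"),       ("desc", "Atteindre exactement 200 touffes d'herbe.")],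
    [("id", "survie_seche"), ("emoji", "☀️"),  ("nom", "Résistance solaire"),("desc", "Survivre a une secheresse sans extinction.")],
    [("id", "survie_hiver"), ("emoji", "❄️"),  ("nom", "Hiver de fer"),     ("desc", "Survivre a un hiver rigoureux sans extinction.")],
    [("id", "cycle"),        ("emoji", "🔄"), ("nom", "Le Cycle"),          ("desc", "Atteindre l'annee 20.")],
    [("id", "extinction"),   ("emoji", "💀"), ("nom", "Extinction"),        ("desc", "Laisser disparaitre une espece.")] ]

-- next(s for s in SUCCES_DEF if s["id"] == sid); every entry of SUCCES_DEF has an "id" key and every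
-- sid passed is present, so find? always succeeds and the getD [] default is never used (exact here).
def nextDef (sid : String) : List (String × String) :=
  ((succesDef.find? (fun s => (PySem.Dict.mk s).get? "id" == some sid)).getD [])

-- Python's inner 'debloquer', acting on the closure state (succes_courants dict, nouveaux list)
def debloquerA (sid : String) (st : PySem.Dict String Bool × List (List (String × String))) :
    PySem.Dict String Bool × List (List (String × String)) :=
  if !(st.1.getD sid false) then (st.1.insert sid true, st.2 ++ [nextDef sid]) else st

def verifier_succes (annee : Int) (predateur : Int) (proie : Int) (vegetal : Int) (meteo_cle : String) (succes_courants : List (String × Bool)) : List (List (String × String)) :=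
  let st0 : PySem.Dict String Bool × List (List (String × String)) := (PySem.Dict.mk succes_courants, [])
  let st1 := if decide (annee ≥ 1) then debloquerA "premier_pas" st0 else st0
  let st2 := if decide (annee ≥ 20) then debloquerA "cycle" st1 else st1
  let st3 := if decide (predateur = 100) then debloquerA "meute_royale" st2 else st2
  let st4 := if decide (proie = 50) then debloquerA "troupeau" st3 else st3
  let st5 := if decide (vegetal = 200) then debloquerA "foret_dense" st4 else st4
  let st6 := if decide (annee ≥ 10) && decide (predateur > 0) && decide (proie > 0) && decide (vegetal > 0) then debloquerA "equilibre" st5 else st5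
  let st7 := if decide (meteo_cle = "secheresse") && decide (predateur > 0) && decide (proie > 0) && decide (vegetal > 0) then debloquerA "survie_seche" st6 else st6
  let st8 := if decide (meteo_cle = "hiver") && decide (predateur > 0) && decide (proie > 0) && decide (vegetal > 0) then debloquerA "survie_hiver" st7 else st7
  let st9 := if decide (predateur = 0) || decide (proie = 0) || decide (vegetal = 0) then debloquerA "extinction" st8 else st8
  st9.2

-- ===== PORT B =====
-- _RANG: announcement-priority rank; _RANG[sid] never raises (every looked-up sid is a key), so getD 0 is exact here
def rangDict : PySem.Dict String Int :=
  PySem.Dict.mk [("premier_pas", 0), ("cycle", 1), ("meute_royale", 2), ("troupeau", 3),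
                 ("foret_dense", 4), ("equilibre", 5), ("survie_seche", 6),
                 ("survie_hiver", 7), ("extinction", 8)]

-- Source B's _debloque: dispatch on the achievement id
def debloqueB (sid : String) (annee : Int) (predateur : Int) (proie : Int) (vegetal : Int) (meteo_cle : String) : Bool :=
  let vivant := decide (predateur > 0) && decide (proie > 0) && decide (vegetal > 0)
  if sid == "premier_pas" then decide (annee ≥ 1)
  else if sid == "cycle" then decide (annee ≥ 20)
  else if sid == "meute_royale" then decide (predateur = 100)
  else if sid == "troupeau" then decide (proie = 50)
  else if sid == "foret_dense" then decide (vegetal = 200)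
  else if sid == "equilibre" then decide (annee ≥ 10) && vivant
  else if sid == "survie_seche" then decide (meteo_cle = "secheresse") && vivant
  else if sid == "survie_hiver" then decide (meteo_cle = "hiver") && vivant
  else if sid == "extinction" then decide (predateur = 0) || decide (proie = 0) || decide (vegetal = 0)
  else false

-- s["id"]: every entry of SUCCES_DEF has an "id" key, so the getD "" default is never used (exact here)
def idOf (s : List (String × String)) : String := (PySem.Dict.mk s).getD "id" ""

def verifier_succes_alt (annee : Int) (predateur : Int) (proie : Int) (vegetal : Int) (meteo_cle : String) (succes_courants : List (String × Bool)) : List (List (String × String)) :=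
  let d := PySem.Dict.mk succes_courants
  let gagnes := succesDef.filter (fun s =>
      debloqueB (idOf s) annee predateur proie vegetal meteo_cle && !(d.getD (idOf s) false))
  PySem.List.sorted gagnes (fun s => rangDict.getD (idOf s) 0) false

-- ===== PRECONDITION & SPEC =====
def Spec_verifier_succes (annee : Int) (predateur : Int) (proie : Int) (vegetal : Int) (meteo_cle : String) (succes_courants : List (String × Bool)) (out : List (List (String × String))) : Prop := out = verifier_succes_alt annee predateur proie vegetal meteo_cle succes_courants
instance (annee : Int) (predateur : Int) (proie : Int) (vegetal : Int) (meteo_cle : String) (succes_courants : List (String × Bool)) (out : List (List (String × String))) : Decidable (Spec_verifier_succes annee predateur proie vegetal meteo_cle succes_courants out) := by unfold Spec_verifier_succes; infer_instance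

-- ===== CLAIM (what is proved, stated in full; the proofs are below) =====
def Claim_equal_verifier_succes : Prop := ∀ (annee : Int) (predateur : Int) (proie : Int) (vegetal : Int) (meteo_cle : String) (succes_courants : List (String × Bool)), Dom_verifier_succes annee predateur proie vegetal meteo_cle succes_courants → Spec_verifier_succes annee predateur proie vegetal meteo_cle succes_courants (verifier_succes annee predateur proie vegetal meteo_cle succes_courants)

-- ===== LEMMAS AND PROOFS =====

-- A's nine checks as a (sid, condition) table, in check order (proof-side view of A only)
def reglesA (annee : Int) (predateur : Int) (proie : Int) (vegetal : Int) (meteo_cle : String) : List (String × Bool) :=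
  let vivant := decide (predateur > 0) && decide (proie > 0) && decide (vegetal > 0)
  [ ("premier_pas",  decide (annee ≥ 1)),
    ("cycle",        decide (annee ≥ 20)),
    ("meute_royale", decide (predateur = 100)),
    ("troupeau",     decide (proie = 50)),
    ("foret_dense",  decide (vegetal = 200)),
    ("equilibre",    decide (annee ≥ 10) && vivant),
    ("survie_seche", decide (meteo_cle = "secheresse") && vivant),
    ("survie_hiver", decide (meteo_cle = "hiver") && vivant),
    ("extinction",   decide (predateur = 0) || decide (proie = 0) || decide (vegetal = 0)) ]

-- the nine definitions in check order (= reglesA's sids through nextDef)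
def checkDefs : List (List (String × String)) :=
  [nextDef "premier_pas", nextDef "cycle", nextDef "meute_royale", nextDef "troupeau",
   nextDef "foret_dense", nextDef "equilibre", nextDef "survie_seche", nextDef "survie_hiver",
   nextDef "extinction"]

-- A's if-chain seen as a fold of debloquerA over the (sid, condition) table
def runA : List (String × Bool) → PySem.Dict String Bool × List (List (String × String)) →
    PySem.Dict String Bool × List (List (String × String))
  | [], st => st
  | (sid, c) :: rs, st => runA rs (if c then debloquerA sid st else st)

-- the accumulated 'nouveaux' of a debloquerA fold is the filter of the rules against the INITIAL dict,
-- provided the rule ids are distinct (each insert only touches its own key)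
theorem runA_eq_filter (rules : List (String × Bool)) (d : PySem.Dict String Bool)
    (acc : List (List (String × String))) (hnd : (rules.map Prod.fst).Nodup) :
    (runA rules (d, acc)).2 =
      acc ++ (rules.filter (fun r => r.2 && !(d.getD r.1 false))).map (fun r => nextDef r.1) := by
  induction rules generalizing d acc with
  | nil => simp [runA]
  | cons r rs ih =>
    obtain ⟨sid, c⟩ := r
    simp only [List.map_cons, List.nodup_cons] at hnd
    obtain ⟨hsid, hnd⟩ := hnd
    by_cases hc : c = true
    · subst hc
      by_cases hg : d.getD sid false = true
      · simp [runA, debloquerA, hg, ih d acc hnd]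
      · replace hg : d.getD sid false = false := by simpa using hg
        simp only [runA, debloquerA, hg, Bool.not_false, if_pos trivial]
        rw [ih (d.insert sid true) (acc ++ [nextDef sid]) hnd]
        rw [List.filter_congr (l := rs)
          (q := fun r => r.2 && !(d.getD r.1 false)) ?_]
        · simp [hg]
        · intro x hx
          have hne : x.1 ≠ sid := by
            intro h; exact hsid (h ▸ List.mem_map_of_mem hx)
          rw [PySem.Dict.getD_insert_of_ne _ _ _ hne]
    · replace hc : c = false := by simpa using hc
      subst hc
      simp [runA, ih d acc hnd]

-- the table ids are distinct
theorem reglesA_nodup (annee predateur proie vegetal : Int) (meteo_cle : String) :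
    ((reglesA annee predateur proie vegetal meteo_cle).map Prod.fst).Nodup := by
  simp only [reglesA, List.map_cons, List.map_nil]
  decide

-- A's let-chain IS runA on the rule table (definitional)
theorem verifier_succes_eq_runA (annee predateur proie vegetal : Int) (meteo_cle : String)
    (succes_courants : List (String × Bool)) :
    verifier_succes annee predateur proie vegetal meteo_cle succes_courants =
      (runA (reglesA annee predateur proie vegetal meteo_cle)
        (PySem.Dict.mk succes_courants, [])).2 := by
  simp only [verifier_succes, reglesA, runA, Bool.and_assoc, Bool.or_assoc]

-- on each table row, B's id-dispatch predicate computes exactly that row's condition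
theorem debloqueB_rows (annee predateur proie vegetal : Int) (meteo_cle : String)
    (d : PySem.Dict String Bool) :
    ∀ r ∈ reglesA annee predateur proie vegetal meteo_cle,
      (fun s => debloqueB (idOf s) annee predateur proie vegetal meteo_cle
          && !(d.getD (idOf s) false)) (nextDef r.1)
        = (r.2 && !(d.getD r.1 false)) := by
  intro r hr
  simp only [reglesA, List.mem_cons, List.not_mem_nil, or_false] at hr
  rcases hr with h | h | h | h | h | h | h | h | h <;> subst h <;> rfl

-- mapping the table's sids through nextDef gives the check-order definition list (definitional)
theorem map_reglesA_eq_checkDefs (annee predateur proie vegetal : Int) (meteo_cle : String) :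
    (reglesA annee predateur proie vegetal meteo_cle).map (fun r => nextDef r.1) = checkDefs := rfl

-- checkDefs is a rearrangement of SUCCES_DEF
theorem checkDefs_perm : checkDefs.Perm succesDef := by decide

-- ranks strictly increase along checkDefs
theorem checkDefs_rank_lt :
    checkDefs.Pairwise (fun a b => rangDict.getD (idOf a) 0 < rangDict.getD (idOf b) 0) := by
  decide

-- ===== VERDICT (by name: the statement is the Claim_ definition above) =====
theorem verifier_succes_spec : Claim_equal_verifier_succes := by
  intro annee predateur proie vegetal meteo_cle succes_courants _
  unfold Spec_verifier_succes
  unfold verifier_succes_alt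
  set d := PySem.Dict.mk succes_courants with hd
  set q : List (String × String) → Bool := fun s =>
    debloqueB (idOf s) annee predateur proie vegetal meteo_cle && !(d.getD (idOf s) false) with hq
  rw [verifier_succes_eq_runA,
    runA_eq_filter _ _ _ (reglesA_nodup annee predateur proie vegetal meteo_cle),
    List.nil_append]
  have hstep : ((reglesA annee predateur proie vegetal meteo_cle).filter
      (fun r => r.2 && !(d.getD r.1 false))).map (fun r => nextDef r.1) = checkDefs.filter q := by
    rw [← map_reglesA_eq_checkDefs annee predateur proie vegetal meteo_cle, List.filter_map]
    exact congrArg _ (List.filter_congr (fun r hr =>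
      (debloqueB_rows annee predateur proie vegetal meteo_cle d r hr).symm))
  rw [hstep]
  exact (PySem.List.sorted_eq_of_perm_of_pairwise_lt _ _ _
    (checkDefs_perm.filter q)
    (checkDefs_rank_lt.sublist List.filter_sublist)).symm
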